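-- pv_equiv track=rewrite | github.com/rsazidur/BracU | CSE111/Assignment1/Task2.py | char_check
-- ===== SOURCE A (Python) =====
-- def char_check(string):
--
--     number_str = "0123456789"
--     len_string = len(string)
--     count = 0
--
--     for item in string:
--         if item in number_str:
--             count += 1
--
--     if count == len_string:
--         return "NUMBER"
--     elif count == 0:
--         return "WORD"
--     else:
--         return "MIXED"
-- ===== SOURCE B (Python) =====
-- def char_check(string):
--     chars = set(string)
--     digits = set("0123456789")
--     if chars <= digits:
--         return "NUMBER"
--     if chars.isdisjoint(digits):
--         return "WORD"
--     return "MIXED"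
-- ===== Notes on version B (the rewrite author's own statement) =====
-- stated objective: simpler
-- what changed: Replaces the digit-counting loop and count-vs-length comparison with set subset/disjoint predicates on the string's character set.
import Mathlib
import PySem

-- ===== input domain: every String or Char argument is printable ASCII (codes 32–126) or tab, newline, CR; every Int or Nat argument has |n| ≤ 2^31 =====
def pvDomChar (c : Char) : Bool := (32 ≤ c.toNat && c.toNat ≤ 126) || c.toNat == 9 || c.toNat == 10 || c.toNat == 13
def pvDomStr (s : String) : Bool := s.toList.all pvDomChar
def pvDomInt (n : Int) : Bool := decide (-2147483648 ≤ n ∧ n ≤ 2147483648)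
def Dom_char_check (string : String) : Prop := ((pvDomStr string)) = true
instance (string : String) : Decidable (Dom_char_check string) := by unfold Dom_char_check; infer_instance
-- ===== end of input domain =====

-- B replaces A's digit-counting loop with set subset/disjoint predicates on the string's character set (simpler).


-- ===== PORT A =====
def char_check (string : String) : String :=
  let number_str : String := "0123456789"
  let len_string : Int := PySem.Str.len string
  let count : Int :=
    string.toList.foldl (fun count item =>
      if number_str.toList.contains item then count + 1 else count) 0
  if count = len_string then "NUMBER"
  else if count = 0 then "WORD"
  else "MIXED"

-- ===== PORT B =====
def char_check_alt (string : String) : String :=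
  let chars := PySem.Set.ofList string.toList
  let digits := PySem.Set.ofList "0123456789".toList
  if PySem.Set.issubset chars digits then "NUMBER"
  else if PySem.Set.isdisjoint chars digits then "WORD"
  else "MIXED"

-- ===== PRECONDITION & SPEC =====
def Spec_char_check (string : String) (out : String) : Prop := out = char_check_alt string
instance (string : String) (out : String) : Decidable (Spec_char_check string out) := by unfold Spec_char_check; infer_instance

-- ===== CLAIM (what is proved, stated in full; the proofs are below) =====
def Claim_equal_char_check : Prop := ∀ (string : String), Dom_char_check string → Spec_char_check string (char_check string)

-- ===== LEMMAS AND PROOFS =====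

theorem pv_count_eq (l : List Char) (p : Char → Bool) :
    l.foldl (fun count item => if p item then count + 1 else count) (0 : Int)
      = (l.countP p : Int) := by
  suffices h : ∀ (a : Int), l.foldl (fun count item => if p item then count + 1 else count) a
      = a + (l.countP p : Int) by simpa using h 0
  induction l with
  | nil => intro a; simp
  | cons x xs ih =>
    intro a
    by_cases hx : p x = true <;> simp [List.foldl, hx, ih] <;> ring

-- ===== VERDICT (by name: the statement is the Claim_ definition above) =====
theorem char_check_spec : Claim_equal_char_check := by
  intro s _
  simp only [Spec_char_check, char_check, char_check_alt, pv_count_eq]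
  set l := s.toList with hl
  set p : Char → Bool := fun x => "0123456789".toList.contains x with hp
  have hsub : PySem.Set.issubset (PySem.Set.ofList l) (PySem.Set.ofList "0123456789".toList) = true
      ↔ ∀ x ∈ l, p x = true := by
    simp [PySem.Set.issubset, PySem.Set.mem_ofList, hp]
  have hdis : PySem.Set.isdisjoint (PySem.Set.ofList l) (PySem.Set.ofList "0123456789".toList) = true
      ↔ ∀ x ∈ l, ¬ p x = true := by
    simp [PySem.Set.isdisjoint, PySem.Set.mem_ofList, hp]
  have hcnt : ((l.countP p : Int) = PySem.Str.len s) ↔ ∀ x ∈ l, p x = true := by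
    rw [PySem.Str.len, ← hl, Int.natCast_inj, List.countP_eq_length]
  have hzero : ((l.countP p : Int) = 0) ↔ ∀ x ∈ l, ¬ p x = true := by
    norm_cast
    simp [List.countP_eq_zero]
  split_ifs with h1 h2 h3 h4 <;> first | rfl | (exfalso; tauto)
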